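-- pv_equiv track=rewrite | github.com/OndrejAlexaj/Subset-tuple-based-complementation-of-BA | complement.py | merge_4s
-- ===== SOURCE A (Python) =====
-- class MyFrozenSet(frozenset):
--     def __repr__(self):
--         return "{"+'{}'.format(', '.join(map(repr, self)))+"}"
--
-- def merge_4s(state):
--     new_state = []
--     new_set_4s = set()
--
--     for set_and_coloring in state:
--         if set_and_coloring[1] == 4:
--             new_set_4s = new_set_4s.union(new_set_4s,set_and_coloring[0])
--         else:
--             if len(new_set_4s) != 0:
--                 new_state.append((MyFrozenSet(new_set_4s),4))
--                 new_set_4s = set()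
--             new_state.append(set_and_coloring)
--
--     if len(new_set_4s) != 0:
--         new_state.append((MyFrozenSet(new_set_4s),4))
--         new_set_4s = set()
--
--     return new_state
-- ===== SOURCE B (Python) =====
-- class MyFrozenSet(frozenset):
--     def __repr__(self):
--         return "{"+'{}'.format(', '.join(map(repr, self)))+"}"
--
-- def merge_4s(state):
--     # Run-based rewrite: find each maximal run of coloring-4 entries, union it once.
--     new_state = []
--     n = len(state)
--     i = 0
--     while i < n:
--         if state[i][1] == 4:
--             union = set()
--             j = i
--             while j < n and state[j][1] == 4:
--                 union = union.union(state[j][0])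
--                 j += 1
--             if union:
--                 new_state.append((MyFrozenSet(union), 4))
--             i = j
--         else:
--             new_state.append(state[i])
--             i += 1
--     return new_state
-- ===== Notes on version B (the rewrite author's own statement) =====
-- stated objective: alternative
-- what changed: Replaced A's single pass that drags a pending-union accumulator and flushes it before every non-4 element and at the end by a run-based two-level loop: locate each maximal run of coloring-4 entries, union that run once, emit it if non-empty, and copy non-4 entries directly.
import Mathlib
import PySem

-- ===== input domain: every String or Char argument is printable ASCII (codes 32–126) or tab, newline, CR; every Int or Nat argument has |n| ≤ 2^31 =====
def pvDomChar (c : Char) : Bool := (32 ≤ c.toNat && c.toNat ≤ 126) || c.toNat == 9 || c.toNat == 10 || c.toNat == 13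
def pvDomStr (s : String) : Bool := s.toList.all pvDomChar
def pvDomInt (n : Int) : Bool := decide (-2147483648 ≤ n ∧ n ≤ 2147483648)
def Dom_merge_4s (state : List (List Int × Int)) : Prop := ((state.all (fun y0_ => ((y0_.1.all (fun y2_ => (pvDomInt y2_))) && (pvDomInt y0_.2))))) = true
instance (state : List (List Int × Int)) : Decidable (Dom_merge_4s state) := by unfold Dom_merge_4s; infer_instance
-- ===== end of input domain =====

-- B replaces A's carried-accumulator single pass by a run-based decomposition (locate each
-- maximal run of coloring-4 entries, union it once); objective: alternative, same cost.

-- ===== PORT A =====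
-- A: one fold carrying (new_state, new_set_4s); flush the pending set before each non-4 entry and at the end.
def merge_4s (state : List (List Int × Int)) : List (List Int × Int) :=
  let r := state.foldl
    (fun (acc : List (List Int × Int) × PySem.Set Int) sc =>
      if sc.2 == 4 then
        (acc.1, PySem.Set.union (PySem.Set.union acc.2 acc.2) sc.1)
      else
        ((if acc.2.length ≠ 0 then acc.1 ++ [(acc.2, (4 : Int))] else acc.1) ++ [sc],
          PySem.Set.empty))
    ([], PySem.Set.empty)
  if r.2.length ≠ 0 then r.1 ++ [(r.2, (4 : Int))] else r.1

-- ===== PORT B =====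
-- inner while loop of Source B: consume the maximal run of coloring-4 entries, returning (union, rest)
def mergeRun (u : PySem.Set Int) : List (List Int × Int) → PySem.Set Int × List (List Int × Int)
  | [] => (u, [])
  | sc :: rest =>
      if sc.2 == 4 then mergeRun (PySem.Set.union u sc.1) rest else (u, sc :: rest)

-- outer while loop of Source B; the Nat fuel (instantiated with the list's length, which the
-- index-bounded Python loop never exceeds) only makes the recursion structural
def mergeGo : Nat → List (List Int × Int) → List (List Int × Int)
  | _, [] => []
  | 0, _ :: _ => []
  | Nat.succ fuel, sc :: rest =>
      if sc.2 == 4 then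
        let p := mergeRun PySem.Set.empty (sc :: rest)
        (if p.1 ≠ [] then [(p.1, (4 : Int))] else []) ++ mergeGo fuel p.2
      else
        sc :: mergeGo fuel rest

def merge_4s_alt (state : List (List Int × Int)) : List (List Int × Int) :=
  mergeGo state.length state

-- ===== PRECONDITION & SPEC =====
def Spec_merge_4s (state : List (List Int × Int)) (out : List (List Int × Int)) : Prop := out = merge_4s_alt state
instance (state : List (List Int × Int)) (out : List (List Int × Int)) : Decidable (Spec_merge_4s state out) := by unfold Spec_merge_4s; infer_instance

-- ===== CLAIM (what is proved, stated in full; the proofs are below) =====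
def Claim_equal_merge_4s : Prop := ∀ (state : List (List Int × Int)), Dom_merge_4s state → Spec_merge_4s state (merge_4s state)

-- ===== LEMMAS AND PROOFS =====

-- mergeRun never lengthens the remainder
theorem mergeRun_len (u : PySem.Set Int) (l : List (List Int × Int)) :
    (mergeRun u l).2.length ≤ l.length := by
  induction l generalizing u with
  | nil => simp [mergeRun]
  | cons sc rest ih =>
      simp only [mergeRun]
      split
      · exact le_trans (ih _) (Nat.le_succ _)
      · exact le_refl _


-- u | u = u (folding add over elements already present is the identity)
theorem union_self_set (u : PySem.Set Int) : PySem.Set.union u u = u := by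
  have : ∀ (l s : List Int), (∀ x ∈ l, x ∈ s) → l.foldl PySem.Set.add s = s := by
    intro l
    induction l with
    | nil => intro s _; rfl
    | cons x xs ih =>
        intro s h
        simp only [List.foldl_cons]
        rw [PySem.Set.add_of_mem (h x (by simp))]
        exact ih s fun y hy => h y (by simp [hy])
  exact this u u (fun _ h => h)

-- the flush of a pending set, as appended by both programs
def emit4 (u : PySem.Set Int) : List (List Int × Int) :=
  if u ≠ [] then [(u, (4 : Int))] else []

-- A's loop body and final flush, named (proof helpers; definitionally A's own code)
def aStep (acc : List (List Int × Int) × PySem.Set Int) (sc : List Int × Int) :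
    List (List Int × Int) × PySem.Set Int :=
  if sc.2 == 4 then
    (acc.1, PySem.Set.union (PySem.Set.union acc.2 acc.2) sc.1)
  else
    ((if acc.2.length ≠ 0 then acc.1 ++ [(acc.2, (4 : Int))] else acc.1) ++ [sc],
      PySem.Set.empty)

def aFin (r : List (List Int × Int) × PySem.Set Int) : List (List Int × Int) :=
  if r.2.length ≠ 0 then r.1 ++ [(r.2, (4 : Int))] else r.1

-- A's loop, restated over the pending set only (proof helper)
def aAux (u : PySem.Set Int) : List (List Int × Int) → List (List Int × Int)
  | [] => emit4 u
  | sc :: rest =>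
      if sc.2 == 4 then aAux (PySem.Set.union (PySem.Set.union u u) sc.1) rest
      else emit4 u ++ sc :: aAux PySem.Set.empty rest

-- the fuel in mergeGo is irrelevant once it covers the list's length
theorem mergeGo_congr : ∀ (f g : Nat) (l : List (List Int × Int)),
    l.length ≤ f → l.length ≤ g → mergeGo f l = mergeGo g l := by
  intro f
  induction f with
  | zero =>
      intro g l hf _
      cases l with
      | nil => cases g <;> rfl
      | cons sc rest => simp at hf
  | succ f ih =>
      intro g l hf hg
      cases l with
      | nil => cases g <;> rfl
      | cons sc rest =>
          cases g with
          | zero => simp at hg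
          | succ g =>
              simp only [mergeGo]
              by_cases h : sc.2 == 4
              · simp only [h, if_pos]
                have hlen : (mergeRun PySem.Set.empty (sc :: rest)).2.length ≤ rest.length := by
                  have he : mergeRun PySem.Set.empty (sc :: rest) =
                      mergeRun (PySem.Set.union PySem.Set.empty sc.1) rest := by
                    simp [mergeRun, h]
                  rw [he]; exact mergeRun_len _ rest
                rw [ih g _ (by simp at hf; omega) (by simp at hg; omega)]
              · simp only [h, Bool.false_eq_true, if_false]
                rw [ih g rest (by simp at hf; omega) (by simp at hg; omega)]

theorem alt_cons_4 (sc : List Int × Int) (rest : List (List Int × Int)) (h : sc.2 == 4) :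
    merge_4s_alt (sc :: rest) =
      (if (mergeRun PySem.Set.empty (sc :: rest)).1 ≠ [] then
        [((mergeRun PySem.Set.empty (sc :: rest)).1, (4 : Int))] else []) ++
        merge_4s_alt (mergeRun PySem.Set.empty (sc :: rest)).2 := by
  have hlen : (mergeRun PySem.Set.empty (sc :: rest)).2.length ≤ rest.length := by
    have he : mergeRun PySem.Set.empty (sc :: rest) =
        mergeRun (PySem.Set.union PySem.Set.empty sc.1) rest := by
      simp [mergeRun, h]
    rw [he]; exact mergeRun_len _ rest
  unfold merge_4s_alt
  simp only [List.length_cons, mergeGo, h, if_pos]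
  rw [mergeGo_congr rest.length (mergeRun PySem.Set.empty (sc :: rest)).2.length _ hlen le_rfl]

theorem alt_cons_not4 (sc : List Int × Int) (rest : List (List Int × Int)) (h : ¬ sc.2 == 4) :
    merge_4s_alt (sc :: rest) = sc :: merge_4s_alt rest := by
  unfold merge_4s_alt
  simp only [List.length_cons, mergeGo, h, Bool.false_eq_true, if_false]

-- emitting mergeRun's union started empty, then continuing, is exactly merge_4s_alt
theorem emit_mergeRun_nil (l : List (List Int × Int)) :
    emit4 (mergeRun PySem.Set.empty l).1 ++ merge_4s_alt (mergeRun PySem.Set.empty l).2 =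
      merge_4s_alt l := by
  cases l with
  | nil => simp [mergeRun, emit4, merge_4s_alt, mergeGo]
  | cons sc rest =>
      by_cases h : sc.2 == 4
      · rw [alt_cons_4 sc rest h]; rfl
      · simp [mergeRun, h, emit4]

theorem aAux_eq (l : List (List Int × Int)) :
    ∀ u, aAux u l = emit4 (mergeRun u l).1 ++ merge_4s_alt (mergeRun u l).2 := by
  induction l with
  | nil => intro u; simp [aAux, mergeRun, merge_4s_alt, mergeGo]
  | cons sc rest ih =>
      intro u
      by_cases h : sc.2 == 4
      · rw [aAux]
        simp only [h, if_pos, mergeRun]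
        rw [union_self_set u]
        exact ih _
      · rw [aAux]
        simp only [h, mergeRun, if_false, Bool.false_eq_true]
        rw [ih PySem.Set.empty, emit_mergeRun_nil rest, alt_cons_not4 sc rest h]

-- A's fold with a general accumulator computes acc ++ aAux u l
theorem fold_eq_aAux (l : List (List Int × Int)) :
    ∀ (acc : List (List Int × Int)) (u : PySem.Set Int),
      aFin (l.foldl aStep (acc, u)) = acc ++ aAux u l := by
  induction l with
  | nil =>
      intro acc u
      simp only [List.foldl_nil, aAux, aFin, emit4]
      by_cases h : u = []
      · simp [h]
      · have : u.length ≠ 0 := by simpa [List.length_eq_zero_iff] using h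
        simp [h, this]
  | cons sc rest ih =>
      intro acc u
      by_cases h : sc.2 == 4
      · rw [aAux]
        simp only [List.foldl_cons, aStep, h, if_pos]
        exact ih acc _
      · simp only [List.foldl_cons, aStep, h, Bool.false_eq_true, if_false]
        rw [ih _ PySem.Set.empty, aAux]
        simp only [h, Bool.false_eq_true, if_false, emit4]
        by_cases hu : u = []
        · simp [hu]
        · have : u.length ≠ 0 := by simpa [List.length_eq_zero_iff] using hu
          simp [hu, this]

-- ===== VERDICT (by name: the statement is the Claim_ definition above) =====
theorem merge_4s_spec : Claim_equal_merge_4s := by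
  intro state _
  unfold Spec_merge_4s
  have hA : merge_4s state = aFin (state.foldl aStep ([], PySem.Set.empty)) := rfl
  rw [hA, fold_eq_aAux state [] PySem.Set.empty, aAux_eq state PySem.Set.empty,
    emit_mergeRun_nil state]
  rfl
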